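-- pv_equiv track=rewrite | github.com/samuelyusunwang/PythonStudy | Think Python/Exercise/Ex_12_5.py | is_reducible
-- ===== SOURCE A (Python) =====
-- def get_children(word, word_list):
--     if word not in word_list:
--         return []
--     else:
--         children = []
--         for i in range(len(word)):
--             w = ''.join([word[0:i],word[i+1:]])
--             if w in word_list:
--                 children.append(w)
--         return children
--
-- def is_reducible(word, word_list, reducible_list):
--     if word not in word_list:
--         return (False, [])
--     elif word in reducible_list:
--         return (True, [])
--     elif word == 'I' or word == 'a' or word == '':
--         return (True, [])
--     elif word == []:
--         return (False, [])
--     else: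
--         children = get_children(word, word_list)
--         for w in children:
--             w_tag, w_children = is_reducible(w, word_list, reducible_list)
--             if not w_tag:
--                 return (False, [])
--         if children == []:
--             return (False, [])
--         else:
--             return (True, children)
-- ===== SOURCE B (Python) =====
-- def is_reducible(word, word_list, reducible_list):
--     word_set = set(word_list)
--     red_set = set(reducible_list)
--     memo = {}
--
--     def reducible(w):
--         if w in memo:
--             return memo[w]
--         if w not in word_set:
--             r = False
--         elif w in red_set or w == 'I' or w == 'a' or w == '':
--             r = True
--         else:
--             children = [c for c in (w[:i] + w[i+1:] for i in range(len(w)))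
--                         if c in word_set]
--             results = [reducible(c) for c in children]
--             r = bool(children) and all(results)
--         memo[w] = r
--         return r
--
--     if word not in word_set:
--         return (False, [])
--     if word in red_set or word == 'I' or word == 'a' or word == '':
--         return (True, [])
--     children = [c for c in (word[:i] + word[i+1:] for i in range(len(word)))
--                 if c in word_set]
--     results = [reducible(c) for c in children]
--     if children and all(results):
--         return (True, children)
--     return (False, [])
-- ===== Notes on version B (the rewrite author's own statement) =====
-- stated objective: alternative
-- what changed: B replaces A's plain re-recursion with list-membership tests by a per-word memo dict over set-based membership, evaluating each distinct word's reducibility once instead of once per recursive visit.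
import Mathlib
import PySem

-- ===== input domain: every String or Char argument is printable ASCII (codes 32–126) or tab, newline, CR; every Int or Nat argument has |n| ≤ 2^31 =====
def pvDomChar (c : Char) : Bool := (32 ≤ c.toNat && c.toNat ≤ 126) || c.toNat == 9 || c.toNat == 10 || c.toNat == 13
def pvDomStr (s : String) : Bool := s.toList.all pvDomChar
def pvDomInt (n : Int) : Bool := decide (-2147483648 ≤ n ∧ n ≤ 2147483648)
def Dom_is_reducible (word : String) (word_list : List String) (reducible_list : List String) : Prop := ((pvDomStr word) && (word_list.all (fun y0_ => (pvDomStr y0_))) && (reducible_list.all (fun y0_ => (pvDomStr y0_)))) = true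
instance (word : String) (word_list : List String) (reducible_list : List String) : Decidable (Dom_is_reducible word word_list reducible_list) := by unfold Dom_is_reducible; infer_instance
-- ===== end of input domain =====

-- B memoizes reducibility per word in a dict and tests membership in a set, computing each
-- distinct word's reducibility once instead of once per recursive visit (alternative algorithm, same values).

-- ===== PORT A =====

-- literal port of get_children: the loop 'for i in range(len(word)): w = ''.join([word[0:i], word[i+1:]]); if w in word_list: children.append(w)'
def get_children (word : String) (word_list : List String) : List String :=
  if ¬ word_list.contains word then []
  else
    (PySem.List.pyRange 0 (PySem.Str.len word) 1).foldl
      (fun children i =>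
        let w := PySem.Str.join "" [PySem.Str.slice word (some 0) (some i), PySem.Str.slice word (some (i + 1)) none]
        if word_list.contains w then children ++ [w] else children) []

-- A's recursion, with a fuel argument for totality: every recursive call is on a child one
-- character shorter than word, so calling with fuel = length of word keeps the fuel equal to the
-- current word's length at every level and the fuel-0 default is never reached.
-- Python's branch 'elif word == []' compares a str with a list and is always False: dead, not ported.
def isRedA (word_list reducible_list : List String) : Nat → String → Bool × List String
  | n, word =>
    if ¬ word_list.contains word then (false, [])
    else if reducible_list.contains word then (true, [])
    else if word = "I" ∨ word = "a" ∨ word = "" then (true, [])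
    else
      let children := get_children word word_list
      match n with
      | 0 => (false, [])
      | n + 1 =>
        -- 'for w in children: … if not w_tag: return (False, [])' = children.all (short-circuit)
        if children.all (fun w => (isRedA word_list reducible_list n w).1) then
          (if children = [] then (false, []) else (true, children))
        else (false, [])

def is_reducible (word : String) (word_list : List String) (reducible_list : List String) : Bool × List String :=
  isRedA word_list reducible_list word.toList.length word

-- ===== PORT B =====

-- w[:i] + w[i+1:] on code points
def pyDelete (cs : List Char) (i : Nat) : List Char := cs.take i ++ cs.drop (i + 1)

-- [c for c in (w[:i] + w[i+1:] for i in range(len(w))) if c in word_set]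
def childrenOf (cs : List Char) (word_set : PySem.Set String) : List String :=
  ((List.range cs.length).map (fun i => String.ofList (pyDelete cs i))).filter
    (fun c => word_set.contains c)

-- the memoized inner 'reducible', threading the memo dict; fuel as in isRedA (always exactly
-- the current word's length when entered through is_reducible_alt, so the fuel-0 default is unreachable)
mutual
def redM (ws rs : PySem.Set String) : Nat → String → PySem.Dict String Bool → Bool × PySem.Dict String Bool
  | n, w, memo =>
    match memo.get? w with
    | some b => (b, memo)
    | none =>
      let p :=
        if ¬ ws.contains w then (false, memo)
        else if rs.contains w ∨ w = "I" ∨ w = "a" ∨ w = "" then (true, memo)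
        else
          match n with
          | 0 => (false, memo)
          | n + 1 =>
            let children := childrenOf w.toList ws
            let q := redL ws rs n children memo
            ((!children.isEmpty) && q.1.all id, q.2)
      (p.1, p.2.insert w p.1)
  termination_by n _ _ => (n, 0)
def redL (ws rs : PySem.Set String) : Nat → List String → PySem.Dict String Bool → List Bool × PySem.Dict String Bool
  | _, [], memo => ([], memo)
  | n, w :: rest, memo =>
    let p := redM ws rs n w memo
    let q := redL ws rs n rest p.2
    (p.1 :: q.1, q.2)
  termination_by n l _ => (n, l.length + 1)
end

def is_reducible_alt (word : String) (word_list : List String) (reducible_list : List String) : Bool × List String :=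
  let ws := PySem.Set.ofList word_list
  let rs := PySem.Set.ofList reducible_list
  if ¬ ws.contains word then (false, [])
  else if rs.contains word ∨ word = "I" ∨ word = "a" ∨ word = "" then (true, [])
  else
    let children := childrenOf word.toList ws
    let q := redL ws rs (word.toList.length - 1) children PySem.Dict.empty
    if (!children.isEmpty) && q.1.all id then (true, children) else (false, [])

-- ===== PRECONDITION & SPEC =====
def Spec_is_reducible (word : String) (word_list : List String) (reducible_list : List String) (out : Bool × List String) : Prop := out = is_reducible_alt word word_list reducible_list
instance (word : String) (word_list : List String) (reducible_list : List String) (out : Bool × List String) : Decidable (Spec_is_reducible word word_list reducible_list out) := by unfold Spec_is_reducible; infer_instance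

-- ===== CLAIM (what is proved, stated in full; the proofs are below) =====
def Claim_equal_is_reducible : Prop := ∀ (word : String) (word_list : List String) (reducible_list : List String), Dom_is_reducible word word_list reducible_list → Spec_is_reducible word word_list reducible_list (is_reducible word word_list reducible_list)

-- ===== LEMMAS AND PROOFS =====

theorem contains_ofList (xs : List String) (c : String) :
    (PySem.Set.ofList xs).contains c = xs.contains c := by
  simp [PySem.Set.contains, PySem.Set.mem_ofList]
theorem join_slices_eq_pyDelete (word : String) (i : Nat) :
    PySem.Str.join "" [PySem.Str.slice word (some 0) (some (i : Int)),
      PySem.Str.slice word (some ((i : Int) + 1)) none] = String.ofList (pyDelete word.toList i) := by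
  have hcast : ((i : Int) + 1) = ((i + 1 : Nat) : Int) := by push_cast; ring
  have h : (PySem.Str.join "" [PySem.Str.slice word (some 0) (some (i : Int)),
      PySem.Str.slice word (some ((i : Int) + 1)) none]).toList = pyDelete word.toList i := by
    rw [PySem.Str.toList_join]
    simp only [List.map_cons, List.map_nil, PySem.Chars.join_cons_cons, PySem.Chars.join_singleton,
      PySem.Str.toList_slice, PySem.Chars.slice_eq_listSlice, PySem.List.slice_zero_start, hcast,
      PySem.List.slice_to_natCast, PySem.List.slice_from_natCast, pyDelete]
    simp
  rw [← String.ofList_toList (s := PySem.Str.join "" _), h]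

theorem get_children_eq (word : String) (wl : List String) (h : wl.contains word = true) :
    get_children word wl = childrenOf word.toList (PySem.Set.ofList wl) := by
  rw [get_children]
  simp only [h, not_true_eq_false, if_false]
  rw [PySem.Str.len_eq, PySem.List.pyRange_zero_natCast, List.foldl_map]
  simp only [join_slices_eq_pyDelete]
  rw [← List.foldl_map (f := fun k => String.ofList (pyDelete word.toList k))
      (g := fun acc w => if wl.contains w then acc ++ [w] else acc),
    PySem.List.foldl_append_if_eq_filter]
  rw [childrenOf]
  simp only [contains_ofList]
  rfl

theorem length_mem_childrenOf (cs : List Char) (ws : PySem.Set String) (c : String)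
    (hc : c ∈ childrenOf cs ws) : c.toList.length + 1 = cs.length := by
  simp only [childrenOf, List.mem_filter, List.mem_map, List.mem_range] at hc
  obtain ⟨⟨i, hi, rfl⟩, -⟩ := hc
  simp only [String.toList_ofList, pyDelete, List.length_append, List.length_take, List.length_drop]
  omega
theorem all_congr_mem {α : Type} (l : List α) (p q : α → Bool) (h : ∀ a ∈ l, p a = q a) :
    l.all p = l.all q := by
  induction l with
  | nil => rfl
  | cons x xs ih => simp_all [List.all_cons]

theorem ne_empty_len (word : String) (h : ¬ word = "") : 1 ≤ word.toList.length := by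
  have : word.toList ≠ [] := by simpa [String.toList_eq_nil_iff] using h
  cases hw : word.toList with
  | nil => exact absurd hw this
  | cons a l => simp

theorem isRedA_fuel (wl rl : List String) :
    ∀ L : Nat, ∀ word : String, word.toList.length ≤ L →
    ∀ n m : Nat, word.toList.length ≤ n → word.toList.length ≤ m →
    isRedA wl rl n word = isRedA wl rl m word := by
  intro L
  induction L using Nat.strong_induction_on with
  | _ L IH =>
    intro word hw n m hn hm
    conv_lhs => rw [isRedA]
    conv_rhs => rw [isRedA]
    by_cases h1 : word ∈ wl
    · by_cases h2 : word ∈ rl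
      · simp [h1, h2]
      · by_cases h3 : word = "I" ∨ word = "a" ∨ word = ""
        · simp [h1, h2, h3]
        · have hlen : 1 ≤ word.toList.length := ne_empty_len word (by tauto)
          obtain ⟨n', rfl⟩ : ∃ n', n = n' + 1 := ⟨n - 1, by omega⟩
          obtain ⟨m', rfl⟩ : ∃ m', m = m' + 1 := ⟨m - 1, by omega⟩
          have key : ∀ x ∈ get_children word wl, isRedA wl rl n' x = isRedA wl rl m' x := by
            intro x hx
            have hlx : x.toList.length + 1 = word.toList.length := by
              apply length_mem_childrenOf word.toList (PySem.Set.ofList wl) x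
              rwa [← get_children_eq word wl (by simpa using h1)]
            exact (IH x.toList.length (by omega) x (le_refl _) n' m' (by omega) (by omega))
          simp only [h3]
          have hcond : ((get_children word wl).all (fun w => (isRedA wl rl n' w).1))
              = ((get_children word wl).all (fun w => (isRedA wl rl m' w).1)) :=
            all_congr_mem _ _ _ (fun a ha => by rw [key a ha])
          simp [hcond]
    · simp [h1]
theorem isRed_not_mem (wl rl : List String) (word : String) (h : ¬ word ∈ wl) :
    is_reducible word wl rl = (false, []) := by
  rw [is_reducible, isRedA]; simp [h]

theorem isRed_rl (wl rl : List String) (word : String) (h1 : word ∈ wl) (h2 : word ∈ rl) :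
    is_reducible word wl rl = (true, []) := by
  rw [is_reducible, isRedA]; simp [h1, h2]

theorem isRed_base (wl rl : List String) (word : String) (h1 : word ∈ wl)
    (h3 : word = "I" ∨ word = "a" ∨ word = "") :
    is_reducible word wl rl = (true, []) := by
  rw [is_reducible, isRedA]
  by_cases h2 : word ∈ rl <;> simp [h1, h2, h3]

theorem isRed_else (wl rl : List String) (word : String)
    (h1 : word ∈ wl) (h2 : ¬ word ∈ rl)
    (h3 : ¬(word = "I" ∨ word = "a" ∨ word = "")) :
    is_reducible word wl rl =
      (if (get_children word wl).all (fun w => (is_reducible w wl rl).1) then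
         (if get_children word wl = [] then (false, []) else (true, get_children word wl))
       else (false, [])) := by
  rw [is_reducible, isRedA]
  have hlen : 1 ≤ word.toList.length := ne_empty_len word (by tauto)
  obtain ⟨k, hk⟩ : ∃ k, word.toList.length = k + 1 := ⟨word.toList.length - 1, by omega⟩
  rw [hk]
  have hcond : ((get_children word wl).all (fun w => (isRedA wl rl k w).1))
      = ((get_children word wl).all (fun w => (is_reducible w wl rl).1)) := by
    apply all_congr_mem
    intro x hx
    have hlx : x.toList.length + 1 = word.toList.length := by
      apply length_mem_childrenOf word.toList (PySem.Set.ofList wl) x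
      rwa [← get_children_eq word wl (by simpa using h1)]
    rw [is_reducible, isRedA_fuel wl rl x.toList.length x (le_refl _) k x.toList.length (by omega) (le_refl _)]
  simp [hcond, h1, h2, h3]
def MemoOK (wl rl : List String) (memo : PySem.Dict String Bool) : Prop :=
  ∀ w b, memo.get? w = some b → b = (is_reducible w wl rl).1

theorem memoOK_insert (wl rl : List String) (memo : PySem.Dict String Bool)
    (hm : MemoOK wl rl memo) (w : String) (b : Bool) (hb : b = (is_reducible w wl rl).1) :
    MemoOK wl rl (memo.insert w b) := by
  intro w' b' h
  rw [PySem.Dict.get?_insert] at h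
  by_cases hw : w' = w
  · simp [hw] at h; subst hw; subst h; exact hb
  · simp [hw] at h; exact hm _ _ h

theorem redL_spec (wl rl : List String) (n : Nat) (chs : List String)
    (H : ∀ w ∈ chs, ∀ memo, MemoOK wl rl memo →
      (redM (PySem.Set.ofList wl) (PySem.Set.ofList rl) n w memo).1 = (is_reducible w wl rl).1 ∧
      MemoOK wl rl (redM (PySem.Set.ofList wl) (PySem.Set.ofList rl) n w memo).2) :
    ∀ memo, MemoOK wl rl memo →
      (redL (PySem.Set.ofList wl) (PySem.Set.ofList rl) n chs memo).1
        = chs.map (fun w => (is_reducible w wl rl).1) ∧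
      MemoOK wl rl (redL (PySem.Set.ofList wl) (PySem.Set.ofList rl) n chs memo).2 := by
  induction chs with
  | nil => intro memo hm; rw [redL]; simpa using hm
  | cons w rest ih =>
    intro memo hm
    rw [redL]
    obtain ⟨hb, hm1⟩ := H w (by simp) memo hm
    obtain ⟨hbs, hm2⟩ := ih (fun x hx => H x (by simp [hx])) _ hm1
    simp [hb, hbs, hm2]

theorem redM_spec (wl rl : List String) :
    ∀ L : Nat, ∀ word : String, word.toList.length ≤ L →
    ∀ n : Nat, word.toList.length ≤ n → ∀ memo, MemoOK wl rl memo →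
    (redM (PySem.Set.ofList wl) (PySem.Set.ofList rl) n word memo).1 = (is_reducible word wl rl).1 ∧
    MemoOK wl rl (redM (PySem.Set.ofList wl) (PySem.Set.ofList rl) n word memo).2 := by
  intro L
  induction L using Nat.strong_induction_on with
  | _ L IH =>
    intro word hw n hn memo hmemo
    rw [redM.eq_def]
    cases hget : memo.get? word with
    | some b =>
      simp only [hget]
      exact ⟨hmemo _ _ hget, hmemo⟩
    | none =>
      simp only [hget]
      by_cases h1 : word ∈ wl
      · by_cases h2 : word ∈ rl ∨ word = "I" ∨ word = "a" ∨ word = ""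
        · have hR : (is_reducible word wl rl).1 = true := by
            rcases h2 with h2 | h3
            · rw [isRed_rl wl rl word h1 h2]
            · rw [isRed_base wl rl word h1 h3]
          rcases h2 with h2 | h3
          · simp only [contains_ofList]
            simp [h1, h2, hR, memoOK_insert wl rl memo hmemo word true hR.symm]
          · simp only [contains_ofList]
            simp [h1, h3, hR, memoOK_insert wl rl memo hmemo word true hR.symm]
        · push Not at h2
          obtain ⟨h2, h3I, h3a, h3e⟩ := h2
          have h3 : ¬(word = "I" ∨ word = "a" ∨ word = "") := by tauto
          have hlen : 1 ≤ word.toList.length := ne_empty_len word h3e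
          obtain ⟨n', rfl⟩ : ∃ n', n = n' + 1 := ⟨n - 1, by omega⟩
          have hch : childrenOf word.toList (PySem.Set.ofList wl) = get_children word wl :=
            (get_children_eq word wl (by simpa using h1)).symm
          have hlens : ∀ w ∈ get_children word wl, w.toList.length + 1 = word.toList.length := by
            intro w hwm
            apply length_mem_childrenOf word.toList (PySem.Set.ofList wl) w
            rwa [hch]
          have HL := redL_spec wl rl n' (get_children word wl)
            (fun w hwm memo' hm' => IH w.toList.length (by have := hlens w hwm; omega)
              w (le_refl _) n' (by have := hlens w hwm; omega) memo' hm')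
            memo hmemo
          obtain ⟨hq1, hq2⟩ := HL
          have hall : ((get_children word wl).map (fun w => (is_reducible w wl rl).1)).all id
              = (get_children word wl).all (fun w => (is_reducible w wl rl).1) := by
            rw [List.all_map]; rfl
          have hR : (is_reducible word wl rl).1
              = ((!(get_children word wl).isEmpty)
                  && (get_children word wl).all (fun w => (is_reducible w wl rl).1)) := by
            rw [isRed_else wl rl word h1 h2 h3]
            cases hC : (get_children word wl) with
            | nil => simp
            | cons c cs =>
              cases hA : (c :: cs).all (fun w => (is_reducible w wl rl).1) <;> simp [hA]
          simp only [contains_ofList]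
          simp only [h1, h2, h3, ite_true, ite_false, not_true_eq_false, not_false_eq_true,
            if_neg, if_pos, or_false, false_or, hch]
          have h2' : rl.contains word = false := by simpa using h2
          simp only [h2', Bool.false_eq_true, if_false]
          have h1' : wl.contains word = true := by simpa using h1
          simp only [h1', eq_self_iff_true, not_true, if_false]
          refine ⟨by rw [hq1, hall]; exact hR.symm, ?_⟩
          exact memoOK_insert wl rl _ hq2 word _ (by rw [hq1, hall]; exact hR.symm)
      · have hR : (is_reducible word wl rl).1 = false := by
          rw [isRed_not_mem wl rl word h1]
        simp only [contains_ofList]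
        simp [h1, hR, memoOK_insert wl rl memo hmemo word false hR.symm]

-- ===== VERDICT (by name: the statement is the Claim_ definition above) =====
theorem empty_memoOK (wl rl : List String) : MemoOK wl rl PySem.Dict.empty := by
  intro w b h
  rw [PySem.Dict.get?_empty] at h
  cases h

theorem is_reducible_spec : Claim_equal_is_reducible := by
  intro word wl rl _
  unfold Spec_is_reducible
  rw [is_reducible_alt]
  by_cases h1 : word ∈ wl
  · by_cases h2 : word ∈ rl
    · rw [isRed_rl wl rl word h1 h2]
      simp [contains_ofList, h1, h2]
    · by_cases h3 : word = "I" ∨ word = "a" ∨ word = ""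
      · rw [isRed_base wl rl word h1 h3]
        simp [contains_ofList, h1, h3]
      · have hlen : 1 ≤ word.toList.length := ne_empty_len word (by tauto)
        have hch : childrenOf word.toList (PySem.Set.ofList wl) = get_children word wl :=
          (get_children_eq word wl (by simpa using h1)).symm
        have hlens : ∀ w ∈ get_children word wl, w.toList.length + 1 = word.toList.length := by
          intro w hwm
          apply length_mem_childrenOf word.toList (PySem.Set.ofList wl) w
          rwa [hch]
        obtain ⟨hq1, -⟩ := redL_spec wl rl (word.toList.length - 1) (get_children word wl)
          (fun w hwm memo' hm' => redM_spec wl rl w.toList.length w (le_refl _)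
            (word.toList.length - 1) (by have := hlens w hwm; omega) memo' hm')
          PySem.Dict.empty (empty_memoOK wl rl)
        have hall : ((get_children word wl).map (fun w => (is_reducible w wl rl).1)).all id
            = (get_children word wl).all (fun w => (is_reducible w wl rl).1) := by
          rw [List.all_map]; rfl
        rw [isRed_else wl rl word h1 h2 h3]
        simp only [contains_ofList]
        have h1' : wl.contains word = true := by simpa using h1
        have h2' : rl.contains word = false := by simpa using h2
        simp only [h1', h2', eq_self_iff_true, not_true, if_false, Bool.false_eq_true, h3, or_false]
        rw [hch, hq1, hall]
        cases hC : (get_children word wl) with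
        | nil => simp
        | cons c cs =>
          cases hA : (c :: cs).all (fun w => (is_reducible w wl rl).1) <;> simp [hA]
  · rw [isRed_not_mem wl rl word h1]
    simp [contains_ofList, h1]
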